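-- pv_equiv track=rewrite | github.com/kimipersonal/kimi | backend/app/services/position_calculator.py | _classify_instrument
-- ===== SOURCE A (Python) =====
-- def _classify_instrument(symbol: str) -> str:
--     """Classify a symbol as forex, crypto, or stock."""
--     clean = symbol.replace("/", "").replace("_", "").replace("-", "").upper()
--     crypto_tokens = {"BTC", "ETH", "SOL", "BNB", "XRP", "ADA", "DOGE", "AVAX",
--                      "DOT", "LINK", "MATIC", "UNI", "ATOM", "LTC", "USDT",
--                      "USDC", "SHIB", "ARB", "OP", "APT"}
--     if any(clean.startswith(t) or clean.endswith(t) for t in crypto_tokens):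
--         return "crypto"
--
--     forex_currencies = {"EUR", "USD", "GBP", "JPY", "AUD", "NZD", "CAD", "CHF"}
--     # Forex pairs are typically 6 chars (EURUSD) or have / separator
--     if len(clean) == 6 and clean[:3] in forex_currencies and clean[3:] in forex_currencies:
--         return "forex"
--
--     return "stock"
-- ===== SOURCE B (Python) =====
-- def _classify_instrument(symbol: str) -> str:
--     """Classify a symbol as forex, crypto, or stock."""
--     # single cleaning pass over the characters instead of three .replace() scans
--     clean = "".join(ch.upper() for ch in symbol if ch not in "/_-")
--     crypto_tokens = {"BTC", "ETH", "SOL", "BNB", "XRP", "ADA", "DOGE", "AVAX",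
--                      "DOT", "LINK", "MATIC", "UNI", "ATOM", "LTC", "USDT",
--                      "USDC", "SHIB", "ARB", "OP", "APT"}
--     # every crypto token is 2-5 chars: collect the prefix/suffix slices of those
--     # lengths once, then test each candidate against the token set
--     candidates = {s for L in range(2, 6) for s in (clean[:L], clean[-L:])}
--     if any(c in crypto_tokens for c in candidates):
--         return "crypto"
--
--     forex_currencies = {"EUR", "USD", "GBP", "JPY", "AUD", "NZD", "CAD", "CHF"}
--     if len(clean) == 6 and clean[:3] in forex_currencies and clean[3:] in forex_currencies:
--         return "forex"
--
--     return "stock"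
-- ===== Notes on version B (the rewrite author's own statement) =====
-- stated objective: alternative
-- what changed: B cleans the symbol in one character-level pass (filter separators + uppercase each char) instead of three .replace() scans plus .upper(), and replaces the scan of all 20 crypto tokens with startswith/endswith by building the set of prefix/suffix slices of lengths 2-5 once and testing those candidates against the token set.
import Mathlib
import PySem

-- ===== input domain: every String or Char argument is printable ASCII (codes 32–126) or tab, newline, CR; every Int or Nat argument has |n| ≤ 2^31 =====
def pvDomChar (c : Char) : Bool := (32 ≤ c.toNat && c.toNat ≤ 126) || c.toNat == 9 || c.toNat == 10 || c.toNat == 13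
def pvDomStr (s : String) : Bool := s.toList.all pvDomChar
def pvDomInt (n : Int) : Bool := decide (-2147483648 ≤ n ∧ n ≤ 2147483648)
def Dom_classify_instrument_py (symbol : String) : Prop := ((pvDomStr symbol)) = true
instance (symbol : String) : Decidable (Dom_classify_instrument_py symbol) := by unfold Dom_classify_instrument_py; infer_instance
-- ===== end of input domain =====

-- B cleans the symbol in one char-level pass (filter separators, uppercase) instead of three
-- replace() scans, and tests the prefix/suffix slices of lengths 2..5 against the crypto token
-- set instead of running startswith/endswith over all 20 tokens (alternative decomposition).

-- ===== PORT A =====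
-- the module-level constant sets of the Python source A
def pvCryptoTokens : List String :=
  ["BTC", "ETH", "SOL", "BNB", "XRP", "ADA", "DOGE", "AVAX",
   "DOT", "LINK", "MATIC", "UNI", "ATOM", "LTC", "USDT",
   "USDC", "SHIB", "ARB", "OP", "APT"]
def pvForexCurrencies : List String :=
  ["EUR", "USD", "GBP", "JPY", "AUD", "NZD", "CAD", "CHF"]

def classify_instrument_py (symbol : String) : String :=
  let clean := PySem.Str.upper
    (PySem.Str.replace (PySem.Str.replace (PySem.Str.replace symbol "/" "") "_" "") "-" "")
  -- any(clean.startswith(t) or clean.endswith(t) for t in crypto_tokens)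
  if pvCryptoTokens.any (fun t => PySem.Str.startswith clean t || PySem.Str.endswith clean t) then
    "crypto"
  else if PySem.Str.len clean == 6
      && pvForexCurrencies.contains (PySem.Str.slice clean none (some 3))
      && pvForexCurrencies.contains (PySem.Str.slice clean (some 3) none) then
    "forex"
  else
    "stock"

-- ===== PORT B =====
-- B works on the character list throughout; its token tables are lists of char lists
def pvCryptoTokensL : List (List Char) :=
  [['B','T','C'], ['E','T','H'], ['S','O','L'], ['B','N','B'], ['X','R','P'],
   ['A','D','A'], ['D','O','G','E'], ['A','V','A','X'], ['D','O','T'],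
   ['L','I','N','K'], ['M','A','T','I','C'], ['U','N','I'], ['A','T','O','M'],
   ['L','T','C'], ['U','S','D','T'], ['U','S','D','C'], ['S','H','I','B'],
   ['A','R','B'], ['O','P'], ['A','P','T']]
def pvForexL : List (List Char) :=
  [['E','U','R'], ['U','S','D'], ['G','B','P'], ['J','P','Y'],
   ['A','U','D'], ['N','Z','D'], ['C','A','D'], ['C','H','F']]

def classify_instrument_py_alt (symbol : String) : String :=
  -- clean = "".join(ch.upper() for ch in symbol if ch not in "/_-")
  let clean : List Char :=
    (symbol.toList.filter (fun ch => !(['/', '_', '-'].contains ch))).map PySem.Chars.upperChar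
  -- candidates = {s for L in range(2, 6) for s in (clean[:L], clean[-L:])}
  let candidates : PySem.Set (List Char) :=
    PySem.Set.ofList ((PySem.List.pyRange 2 6 1).flatMap (fun L =>
      [PySem.List.slice clean none (some L), PySem.List.slice clean (some (-L)) none]))
  -- any(c in crypto_tokens for c in candidates)
  if candidates.any (fun c => pvCryptoTokensL.contains c) then
    "crypto"
  else if clean.length == 6
      && pvForexL.contains (PySem.List.slice clean none (some 3))
      && pvForexL.contains (PySem.List.slice clean (some 3) none) then
    "forex"
  else
    "stock"

-- ===== PRECONDITION & SPEC =====
def Spec_classify_instrument_py (symbol : String) (out : String) : Prop := out = classify_instrument_py_alt symbol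
instance (symbol : String) (out : String) : Decidable (Spec_classify_instrument_py symbol out) := by unfold Spec_classify_instrument_py; infer_instance

-- ===== CLAIM (what is proved, stated in full; the proofs are below) =====
def Claim_equal_classify_instrument_py : Prop := ∀ (symbol : String), Dom_classify_instrument_py symbol → Spec_classify_instrument_py symbol (classify_instrument_py symbol)

-- ===== LEMMAS AND PROOFS =====

-- replacing a single-character pattern by "" is filtering that character out
lemma pv_replace_go_single (d : Char) (l acc : List Char) (fuel : Nat) (h : l.length ≤ fuel) :
    PySem.Chars.replace.go [d] [] fuel l acc = acc.reverse ++ l.filter (· ≠ d) := by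
  induction l generalizing fuel acc with
  | nil => cases fuel <;> simp [PySem.Chars.replace.go]
  | cons c t ih =>
    cases fuel with
    | zero => simp at h
    | succ n =>
      simp only [List.length_cons, Nat.succ_le_succ_iff] at h
      by_cases hc : c = d
      · subst hc
        simp [PySem.Chars.replace.go, List.isPrefixOf, ih acc n h, ne_eq]
      · have hpre : ¬ [d].isPrefixOf (c :: t) := by
          simp [List.isPrefixOf_iff_prefix, List.prefix_cons_iff]; intro hd; exact (hc hd.symm).elim
        simp [PySem.Chars.replace.go, hpre, ih (c :: acc) n h, ne_eq, hc]

lemma pv_replace_single (d : Char) (s : List Char) :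
    PySem.Chars.replace s [d] [] = s.filter (· ≠ d) := by
  simp [PySem.Chars.replace, pv_replace_go_single d s [] s.length le_rfl]

-- A's cleaning chain equals B's single filter-and-map pass, on the char-list side
lemma pv_clean_eq (symbol : String) :
    (PySem.Str.upper
      (PySem.Str.replace (PySem.Str.replace (PySem.Str.replace symbol "/" "") "_" "") "-" "")).toList
    = (symbol.toList.filter (fun ch => !(['/', '_', '-'].contains ch))).map PySem.Chars.upperChar := by
  simp only [PySem.Str.toList_upper, PySem.Str.toList_replace]
  show PySem.Chars.upper (PySem.Chars.replace (PySem.Chars.replace (PySem.Chars.replace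
      symbol.toList ['/'] []) ['_'] []) ['-'] []) = _
  rw [pv_replace_single, pv_replace_single, pv_replace_single, List.filter_filter, List.filter_filter]
  unfold PySem.Chars.upper
  congr 1
  apply List.filter_congr
  intro c _
  simp [List.contains_eq_mem]
  simp [Bool.and_comm, Bool.and_left_comm]

-- A's crypto test, on an arbitrary cleaned string
def pvCondA (c : String) : Bool :=
  pvCryptoTokens.any (fun t => PySem.Str.startswith c t || PySem.Str.endswith c t)

-- B's crypto test, on an arbitrary cleaned char list
def pvCondB (cl : List Char) : Bool :=
  (PySem.Set.ofList ((PySem.List.pyRange 2 6 1).flatMap (fun L =>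
    [PySem.List.slice cl none (some L), PySem.List.slice cl (some (-L)) none]))).any
    (fun c => pvCryptoTokensL.contains c)

lemma pv_tokens_map : pvCryptoTokensL = pvCryptoTokens.map String.toList := by decide

lemma pv_forex_map : pvForexL = pvForexCurrencies.map String.toList := by decide

lemma pv_prefix_slice (c : List Char) (L : Int) (h : 0 ≤ L) :
    PySem.List.slice c none (some L) = c.take L.toNat := PySem.List.slice_to c h

lemma pv_suffix_slice (c : List Char) (L : Int) (h : 0 < L) :
    PySem.List.slice c (some (-L)) none = c.drop (c.length - L.toNat) := by
  lift L to ℕ using h.le with k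
  have hk : 0 < k := by exact_mod_cast h
  simp only [PySem.List.slice_from_neg_natCast _ k hk, Int.toNat_natCast]

lemma pv_len_range : ∀ t ∈ pvCryptoTokens, (t.toList.length : Int) ∈ PySem.List.pyRange 2 6 1 := by
  decide

lemma pv_cond_eq (c : String) : pvCondA c = pvCondB c.toList := by
  rw [Bool.eq_iff_iff]
  unfold pvCondA pvCondB
  simp only [List.any_eq_true, Bool.or_eq_true, List.contains_iff_mem,
    PySem.Str.startswith_eq, PySem.Str.endswith_eq,
    PySem.Chars.startswith_iff, PySem.Chars.endswith_iff,
    PySem.Set.mem_ofList, List.mem_flatMap, pv_tokens_map, List.mem_map,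
    List.mem_cons, List.not_mem_nil, or_false]
  constructor
  · rintro ⟨t, ht, h | h⟩
    · have hL : (0:Int) < (t.toList.length : Int) := by
        have := pv_len_range t ht
        rw [PySem.List.mem_pyRange_one] at this; omega
      refine ⟨PySem.List.slice c.toList none (some (t.toList.length : Int)),
        ⟨(t.toList.length : Int), pv_len_range t ht, Or.inl rfl⟩, t, ht, ?_⟩
      rw [pv_prefix_slice _ _ hL.le, Int.toNat_natCast]
      exact List.prefix_iff_eq_take.mp h
    · have hL : (0:Int) < (t.toList.length : Int) := by
        have := pv_len_range t ht
        rw [PySem.List.mem_pyRange_one] at this; omega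
      refine ⟨PySem.List.slice c.toList (some (-(t.toList.length : Int))) none,
        ⟨(t.toList.length : Int), pv_len_range t ht, Or.inr rfl⟩, t, ht, ?_⟩
      rw [pv_suffix_slice _ _ hL, Int.toNat_natCast]
      exact List.suffix_iff_eq_drop.mp h
  · rintro ⟨s, ⟨L, hL, hs | hs⟩, t, ht, hts⟩
    · have hL0 : (0:Int) ≤ L := by rw [PySem.List.mem_pyRange_one] at hL; omega
      refine ⟨t, ht, Or.inl ?_⟩
      rw [hts, hs, pv_prefix_slice _ _ hL0]
      exact List.take_prefix _ _
    · have hL0 : (0:Int) < L := by rw [PySem.List.mem_pyRange_one] at hL; omega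
      refine ⟨t, ht, Or.inr ?_⟩
      rw [hts, hs, pv_suffix_slice _ _ hL0]
      exact List.drop_suffix _ _

-- forex membership transfers between the String table and the char-list table
lemma pv_forex_mem (s : String) :
    pvForexCurrencies.contains s = pvForexL.contains s.toList := by
  rw [Bool.eq_iff_iff]
  simp only [List.contains_iff_mem, pv_forex_map, List.mem_map]
  constructor
  · intro h; exact ⟨s, h, rfl⟩
  · rintro ⟨t, ht, hts⟩; rwa [String.toList_inj.mp hts] at ht

-- A's forex test equals B's, on the char-list side, for any cleaned string
lemma pv_forex_cond (c : String) :
    (PySem.Str.len c == 6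
      && pvForexCurrencies.contains (PySem.Str.slice c none (some 3))
      && pvForexCurrencies.contains (PySem.Str.slice c (some 3) none))
    = (c.toList.length == 6
      && pvForexL.contains (PySem.List.slice c.toList none (some 3))
      && pvForexL.contains (PySem.List.slice c.toList (some 3) none)) := by
  have h1 : (PySem.Str.len c == 6) = (c.toList.length == 6) := by
    rw [Bool.eq_iff_iff]
    simp [PySem.Str.len_eq]
    omega
  have h2 : ∀ (a b : Option Int), pvForexCurrencies.contains (PySem.Str.slice c a b)
      = pvForexL.contains (PySem.List.slice c.toList a b) := by
    intro a b
    rw [pv_forex_mem]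
    congr 1
    simp [PySem.Str.toList_slice, PySem.Chars.slice_eq_listSlice]
  rw [h1, h2, h2]

-- ===== VERDICT (by name: the statement is the Claim_ definition above) =====
theorem classify_instrument_py_spec : Claim_equal_classify_instrument_py := by
  intro symbol _
  unfold Spec_classify_instrument_py classify_instrument_py classify_instrument_py_alt
  have hclean := pv_clean_eq symbol
  have hcond := pv_cond_eq (PySem.Str.upper
    (PySem.Str.replace (PySem.Str.replace (PySem.Str.replace symbol "/" "") "_" "") "-" ""))
  rw [hclean] at hcond
  unfold pvCondA pvCondB at hcond
  simp only [hcond]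
  split
  · rfl
  · simp only [pv_forex_cond, hclean]
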